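-- pv_equiv track=rewrite | github.com/christian-taillon/apt-tracker-md | apt.py | modify_toolset_malware
-- ===== SOURCE A (Python) =====
-- def modify_toolset_malware(content):
--     lines = content.split('\n')
--     modified_lines = []
--     in_toolset_section = False
--
--     for line in lines:
--         if line.startswith("## TOOLSET / MALWARE"):
--             in_toolset_section = True
--             modified_lines.append(line)
--         elif in_toolset_section and line.strip():
--             tools = line.split(',')
--             modified_tools = []
--             for tool in tools:
--                 tool = tool.strip()
--                 if len(tool.split()) <= 2:
--                     tool = f"[[{tool}]]"
--                 modified_tools.append(tool)
--             modified_lines.append(', '.join(modified_tools))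
--             in_toolset_section = False
--         else:
--             modified_lines.append(line)
--
--     return '\n'.join(modified_lines)
-- ===== SOURCE B (Python) =====
-- HEADER = "## TOOLSET / MALWARE"
--
-- def _wrap_line(line):
--     parts = []
--     for tool in line.split(','):
--         tool = tool.strip()
--         if len(tool.split()) <= 2:
--             tool = f"[[{tool}]]"
--         parts.append(tool)
--     return ', '.join(parts)
--
-- def modify_toolset_malware(content):
--     lines = content.split('\n')
--     n = len(lines)
--     targets = set()
--     for i, line in enumerate(lines):
--         if line.startswith(HEADER):
--             j = i + 1
--             while j < n and (lines[j].startswith(HEADER) or not lines[j].strip()):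
--                 j += 1
--             if j < n:
--                 targets.add(j)
--     return '\n'.join(_wrap_line(l) if i in targets else l
--                      for i, l in enumerate(lines))
-- ===== Notes on version B (the rewrite author's own statement) =====
-- stated objective: alternative
-- what changed: A's single stateful pass with a toggling in-section flag is replaced by two stateless passes: first precompute the set of target line indices (for each '## TOOLSET / MALWARE' header, walk forward past blank and header lines to the first ordinary line), then emit every line unchanged except the target indices, which get the bracket-wrapping treatment.
import Mathlib
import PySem

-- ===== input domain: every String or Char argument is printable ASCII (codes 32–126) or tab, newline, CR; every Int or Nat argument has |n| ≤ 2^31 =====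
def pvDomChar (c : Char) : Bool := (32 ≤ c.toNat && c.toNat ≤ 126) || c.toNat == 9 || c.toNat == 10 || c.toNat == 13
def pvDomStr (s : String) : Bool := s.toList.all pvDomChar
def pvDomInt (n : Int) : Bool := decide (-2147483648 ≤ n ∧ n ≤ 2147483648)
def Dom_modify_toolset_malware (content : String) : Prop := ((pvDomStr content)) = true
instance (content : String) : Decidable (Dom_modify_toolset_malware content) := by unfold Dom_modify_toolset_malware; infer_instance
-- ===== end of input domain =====

-- B replaces A's stateful toggling flag by a two-pass scheme: precompute the set of line
-- indices to transform (first non-blank, non-header line after each section header), then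
-- emit every line in a single stateless pass (objective: alternative decomposition).

-- ===== PORT A =====
def pvHeader (l : String) : Bool := PySem.Str.startswith l "## TOOLSET / MALWARE"

def pvWrapA (line : String) : String :=
  let tools := (PySem.Str.split? line ",").getD []   -- sep "," ≠ "" so split? is some
  let modified := tools.foldl (fun acc tool =>
    let t := PySem.Str.strip tool
    let t := if (PySem.Str.split₀ t).length ≤ 2 then PySem.Str.join "" ["[[", t, "]]"] else t
    acc ++ [t]) []
  PySem.Str.join ", " modified

def pvStepA (st : Bool × List String) (line : String) : Bool × List String :=
  if pvHeader line then (true, st.2 ++ [line])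
  else if st.1 && !(PySem.Str.strip line == "") then (false, st.2 ++ [pvWrapA line])
  else (st.1, st.2 ++ [line])

def modify_toolset_malware (content : String) : String :=
  PySem.Str.join "\n" ((((PySem.Str.split? content "\n").getD []).foldl pvStepA (false, [])).2)

-- ===== PORT B =====
def pvWrapB (line : String) : String :=
  PySem.Str.join ", " (((PySem.Str.split? line ",").getD []).map (fun tool =>
    let t := PySem.Str.strip tool
    if (PySem.Str.split₀ t).length ≤ 2 then PySem.Str.join "" ["[[", t, "]]"] else t))

-- 'while j < n and (lines[j].startswith(HEADER) or not lines[j].strip()): j += 1; return j if j < n'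
def pvSkip (l : String) : Bool := pvHeader l || (PySem.Str.strip l == "")

def pvWalk (lines : List String) (j : Nat) : Option Nat :=
  if h : j < lines.length then
    if pvSkip lines[j] then pvWalk lines (j + 1) else some j
  else none
termination_by lines.length - j

def pvTargets (lines : List String) : PySem.Set Nat :=
  lines.zipIdx.foldl (fun s p =>
    if pvHeader p.1 then
      match pvWalk lines (p.2 + 1) with
      | some j => PySem.Set.add s j
      | none => s
    else s) PySem.Set.empty

def modify_toolset_malware_alt (content : String) : String :=
  let lines := (PySem.Str.split? content "\n").getD []
  PySem.Str.join "\n" (lines.zipIdx.map (fun p =>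
    if PySem.Set.contains (pvTargets lines) p.2 then pvWrapB p.1 else p.1))

-- ===== PRECONDITION & SPEC =====
def Spec_modify_toolset_malware (content : String) (out : String) : Prop := out = modify_toolset_malware_alt content
instance (content : String) (out : String) : Decidable (Spec_modify_toolset_malware content out) := by unfold Spec_modify_toolset_malware; infer_instance

-- ===== CLAIM (what is proved, stated in full; the proofs are below) =====
def Claim_equal_modify_toolset_malware : Prop := ∀ (content : String), Dom_modify_toolset_malware content → Spec_modify_toolset_malware content (modify_toolset_malware content)

-- ===== LEMMAS AND PROOFS =====

-- A's loop as a structural recursion over the remaining lines.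
def pvProc (f : Bool) : List String → List String
  | [] => []
  | l :: rest =>
    if pvHeader l then l :: pvProc true rest
    else if f && !(PySem.Str.strip l == "") then pvWrapA l :: pvProc false rest
    else l :: pvProc f rest

lemma foldlA_eq_proc (ls : List String) : ∀ (f : Bool) (acc : List String),
    (ls.foldl pvStepA (f, acc)).2 = acc ++ pvProc f ls := by
  induction ls with
  | nil => intro f acc; simp [pvProc]
  | cons l rest ih =>
    intro f acc
    by_cases h1 : pvHeader l = true
    · simp [pvStepA, pvProc, h1, ih]
    · by_cases h2 : (f && !(PySem.Str.strip l == "")) = true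
      · simp [pvStepA, pvProc, h1, h2, ih]
      · simp [pvStepA, pvProc, h1, h2, ih]

lemma foldl_push {α β : Type} (g : α → β) : ∀ (ts : List α) (acc : List β),
    ts.foldl (fun acc t => acc ++ [g t]) acc = acc ++ ts.map g := by
  intro ts
  induction ts with
  | nil => intro acc; simp
  | cons t ts ih => intro acc; simp [ih]

lemma wrapA_eq_wrapB : pvWrapA = pvWrapB := by
  funext line
  exact congrArg (PySem.Str.join ", ")
    ((foldl_push (fun tool =>
        let t := PySem.Str.strip tool
        if (PySem.Str.split₀ t).length ≤ 2 then PySem.Str.join "" ["[[", t, "]]"] else t)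
      ((PySem.Str.split? line ",").getD []) []).trans
      (List.nil_append _))

lemma pvGetD_eq (lines : List String) (m : Nat) (h : m < lines.length) :
    lines.getD m "" = lines[m] := by
  simp [List.getD_eq_getElem?_getD, List.getElem?_eq_getElem h]

-- Boolean form of "index i is a target": some header line k has i as its walk result.
def pvTb (lines : List String) (i : Nat) : Bool :=
  lines.zipIdx.any (fun p => pvHeader p.1 && (pvWalk lines (p.2 + 1) == some i))

lemma mem_targets_fold (lines : List String) (i : Nat) :
    ∀ (ps : List (String × Nat)) (s : PySem.Set Nat),
      (i ∈ ps.foldl (fun s p =>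
        if pvHeader p.1 then
          match pvWalk lines (p.2 + 1) with
          | some j => PySem.Set.add s j
          | none => s
        else s) s) ↔ i ∈ s ∨ ∃ p ∈ ps, pvHeader p.1 = true ∧ pvWalk lines (p.2 + 1) = some i := by
  intro ps
  induction ps with
  | nil => intro s; simp
  | cons p ps ih =>
    intro s
    simp only [List.foldl_cons, ih]
    by_cases h1 : pvHeader p.1 = true
    · cases hw : pvWalk lines (p.2 + 1) with
      | none =>
        simp only [h1, if_pos]
        constructor
        · rintro (hs | ⟨q, hq, h⟩)
          · exact Or.inl hs
          · exact Or.inr ⟨q, List.mem_cons_of_mem _ hq, h⟩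
        · rintro (hs | ⟨q, hq, hh, hwq⟩)
          · exact Or.inl hs
          · rcases List.mem_cons.mp hq with rfl | hq
            · rw [hw] at hwq; cases hwq
            · exact Or.inr ⟨q, hq, hh, hwq⟩
      | some j =>
        simp only [h1, if_pos, PySem.Set.mem_add]
        constructor
        · rintro ((hs | rfl) | ⟨q, hq, h⟩)
          · exact Or.inl hs
          · exact Or.inr ⟨p, List.mem_cons_self .., h1, hw⟩
          · exact Or.inr ⟨q, List.mem_cons_of_mem _ hq, h⟩
        · rintro (hs | ⟨q, hq, hh, hwq⟩)
          · exact Or.inl (Or.inl hs)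
          · rcases List.mem_cons.mp hq with rfl | hq
            · rw [hw] at hwq; cases hwq; exact Or.inl (Or.inr rfl)
            · exact Or.inr ⟨q, hq, hh, hwq⟩
    · simp only [h1, if_neg, Bool.not_eq_true]
      constructor
      · rintro (hs | ⟨q, hq, h⟩)
        · exact Or.inl hs
        · exact Or.inr ⟨q, List.mem_cons_of_mem _ hq, h⟩
      · rintro (hs | ⟨q, hq, hh, hwq⟩)
        · exact Or.inl hs
        · rcases List.mem_cons.mp hq with rfl | hq
          · exact absurd hh h1
          · exact Or.inr ⟨q, hq, hh, hwq⟩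

lemma contains_targets (lines : List String) (i : Nat) :
    PySem.Set.contains (pvTargets lines) i = pvTb lines i := by
  rw [Bool.eq_iff_iff, PySem.Set.contains_iff]
  unfold pvTargets pvTb
  rw [mem_targets_fold]
  simp [PySem.Set.empty, List.any_eq_true]

lemma walk_sound (lines : List String) : ∀ (j i : Nat), pvWalk lines j = some i →
    j ≤ i ∧ i < lines.length ∧ pvSkip (lines.getD i "") = false ∧
      ∀ m, j ≤ m → m < i → pvSkip (lines.getD m "") = true := by
  intro j
  fun_induction pvWalk lines j with
  | case1 j h hskip ih =>
    intro i hw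
    obtain ⟨h1, h2, h3, h4⟩ := ih i hw
    refine ⟨by omega, h2, h3, ?_⟩
    intro m hm1 hm2
    rcases Nat.eq_or_lt_of_le hm1 with heq | hm
    · rw [← heq, pvGetD_eq lines j h]; exact hskip
    · exact h4 m hm hm2
  | case2 j h hskip =>
    intro i hw
    cases hw
    refine ⟨le_refl _, h, ?_, ?_⟩
    · rw [pvGetD_eq lines j h]; simpa using hskip
    · intro m hm1 hm2; omega
  | case3 j h =>
    intro i hw
    cases hw

lemma walk_complete (lines : List String) : ∀ (j i : Nat), j ≤ i → i < lines.length →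
    pvSkip (lines.getD i "") = false → (∀ m, j ≤ m → m < i → pvSkip (lines.getD m "") = true) →
    pvWalk lines j = some i := by
  intro j
  fun_induction pvWalk lines j with
  | case1 j h hskip ih =>
    intro i hji hi hfree hall
    have hne : j ≠ i := by
      intro heq
      have h2 : pvSkip (lines.getD j "") = true := by
        rw [pvGetD_eq lines j h]; exact hskip
      rw [heq, hfree] at h2
      cases h2
    exact ih i (by omega) hi hfree (fun m hm1 hm2 => hall m (by omega) hm2)
  | case2 j h hskip =>
    intro i hji hi hfree hall
    have : j = i := by
      by_contra hne
      have := hall j (le_refl _) (by omega)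
      rw [pvGetD_eq lines j h] at this
      rw [this] at hskip
      cases hskip rfl
    rw [this]
  | case3 j h =>
    intro i hji hi hfree hall
    omega

-- "a header is pending before line d" (A's flag value before line d, started false)
def pvPend (lines : List String) (d : Nat) : Prop :=
  ∃ k, k < d ∧ pvHeader (lines.getD k "") = true ∧
    ∀ m, k < m → m < d → pvSkip (lines.getD m "") = true

lemma pvTb_iff (lines : List String) (i : Nat) :
    pvTb lines i = true ↔ ∃ k, k < lines.length ∧ pvHeader (lines.getD k "") = true ∧
      pvWalk lines (k + 1) = some i := by
  unfold pvTb
  rw [List.any_eq_true]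
  constructor
  · rintro ⟨⟨x, k⟩, hp, hcond⟩
    obtain ⟨hk0, hk1, hx⟩ := List.mem_zipIdx hp
    simp only [Nat.zero_add, Nat.sub_zero] at hk1 hx
    rw [Bool.and_eq_true, beq_iff_eq] at hcond
    refine ⟨k, by omega, ?_, hcond.2⟩
    rw [pvGetD_eq lines k (by omega), ← hx]
    exact hcond.1
  · rintro ⟨k, hk, hh, hw⟩
    refine ⟨(lines[k], k), ?_, ?_⟩
    · have hlen : k < (lines.zipIdx).length := by rw [List.length_zipIdx]; omega
      have := List.getElem_zipIdx (l := lines) (j := 0) hlen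
      rw [Nat.zero_add] at this
      rw [← this]
      exact List.getElem_mem hlen
    · rw [Bool.and_eq_true, beq_iff_eq]
      rw [pvGetD_eq lines k hk] at hh
      exact ⟨hh, hw⟩

lemma main_lemma (lines : List String) : ∀ (c d : Nat) (f : Bool), lines.length - d = c →
    (f = true ↔ pvPend lines d) →
    pvProc f (lines.drop d) = (List.zipIdx (lines.drop d) d).map
      (fun p => if pvTb lines p.2 then pvWrapA p.1 else p.1) := by
  intro c
  induction c with
  | zero =>
    intro d f hc hf
    rw [List.drop_eq_nil_of_le (by omega)]
    simp [pvProc]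
  | succ c ih =>
    intro d f hc hf
    have hd : d < lines.length := by omega
    rw [List.drop_eq_getElem_cons hd, List.zipIdx_cons]
    have hgd : lines.getD d "" = lines[d] := pvGetD_eq lines d hd
    by_cases hh : pvHeader lines[d] = true
    · -- header line: emitted unchanged, flag becomes true
      have hT : pvTb lines d = false := by
        rw [Bool.eq_false_iff]
        intro htb
        obtain ⟨k, hk, hkh, hw⟩ := (pvTb_iff lines d).mp htb
        obtain ⟨_, _, hfree, _⟩ := walk_sound lines (k + 1) d hw
        rw [hgd] at hfree
        unfold pvSkip at hfree
        rw [hh] at hfree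
        cases hfree
      have htail := ih (d + 1) true (by omega)
        ⟨fun _ => ⟨d, by omega, by rw [hgd]; exact hh, fun m h1 h2 => by omega⟩, fun _ => rfl⟩
      simp [pvProc, hh, hT, htail]
    · by_cases hf2 : (f && !(PySem.Str.strip lines[d] == "")) = true
      · -- flag set, non-blank: wrapped, flag reset
        rw [Bool.and_eq_true, Bool.not_eq_true', beq_eq_false_iff_ne] at hf2
        obtain ⟨hft, hnb⟩ := hf2
        obtain ⟨k, hk, hkh, hall⟩ := hf.mp hft
        have hskipd : pvSkip (lines.getD d "") = false := by
          rw [hgd]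
          unfold pvSkip
          rw [Bool.or_eq_false_iff]
          constructor
          · exact Bool.not_eq_true _ ▸ hh
          · rw [beq_eq_false_iff_ne]; exact hnb
        have hw : pvWalk lines (k + 1) = some d :=
          walk_complete lines (k + 1) d (by omega) hd hskipd
            (fun m h1 h2 => hall m (by omega) h2)
        have hT : pvTb lines d = true := (pvTb_iff lines d).mpr ⟨k, by omega, hkh, hw⟩
        have hpend1 : ¬ pvPend lines (d + 1) := by
          rintro ⟨k', hk', hkh', hall'⟩
          rcases Nat.lt_succ_iff_lt_or_eq.mp hk' with hlt | rfl
          · have h2 := hall' d hlt (by omega)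
            rw [hskipd] at h2
            cases h2
          · rw [hgd] at hkh'
            exact hh hkh'
        have htail := ih (d + 1) false (by omega)
          ⟨fun h => absurd h Bool.false_ne_true, fun h => absurd h hpend1⟩
        have hf2' : (f && !(PySem.Str.strip lines[d] == "")) = true := by
          rw [Bool.and_eq_true, Bool.not_eq_true', beq_eq_false_iff_ne]
          exact ⟨hft, hnb⟩
        simp [pvProc, hh, hf2', hT, htail]
      · -- neither header nor (flag ∧ non-blank): emitted unchanged, flag kept
        have hT : pvTb lines d = false := by
          rw [Bool.eq_false_iff]
          intro htb
          obtain ⟨k, hk, hkh, hw⟩ := (pvTb_iff lines d).mp htb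
          obtain ⟨hj, _, hfree, hmid⟩ := walk_sound lines (k + 1) d hw
          rw [hgd] at hfree
          unfold pvSkip at hfree
          rw [Bool.or_eq_false_iff] at hfree
          have hft : f = true := hf.mpr ⟨k, by omega, hkh, fun m h1 h2 => hmid m (by omega) h2⟩
          rw [hft, Bool.true_and, Bool.not_eq_true', hfree.2] at hf2
          exact hf2 rfl
        have hpend : (f = true ↔ pvPend lines (d + 1)) := by
          by_cases hb : (PySem.Str.strip lines[d] == "") = true
          · -- blank line: pending status unchanged
            constructor
            · intro hft
              obtain ⟨k, hk, hkh, hall⟩ := hf.mp hft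
              refine ⟨k, by omega, hkh, fun m h1 h2 => ?_⟩
              rcases Nat.lt_succ_iff_lt_or_eq.mp h2 with hlt | rfl
              · exact hall m h1 hlt
              · rw [hgd]; unfold pvSkip; rw [hb, Bool.or_true]
            · rintro ⟨k, hk, hkh, hall⟩
              rcases Nat.lt_succ_iff_lt_or_eq.mp hk with hlt | rfl
              · exact hf.mpr ⟨k, hlt, hkh, fun m h1 h2 => hall m h1 (by omega)⟩
              · rw [hgd] at hkh; exact absurd hkh hh
          · -- non-blank (and flag must be false here)
            have hff : f = false := by
              cases f
              · rfl
              · exfalso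
                rw [Bool.true_and, Bool.not_eq_true'] at hf2
                rw [Bool.not_eq_true] at hb
                exact hf2 hb
            rw [hff]
            constructor
            · intro h; exact absurd h Bool.false_ne_true
            · rintro ⟨k, hk, hkh, hall⟩
              rcases Nat.lt_succ_iff_lt_or_eq.mp hk with hlt | rfl
              · have := hall d hlt (by omega)
                rw [hgd] at this
                unfold pvSkip at this
                rw [Bool.not_eq_true] at hb
                rw [hb, Bool.or_false] at this
                exact absurd this hh
              · rw [hgd] at hkh; exact absurd hkh hh
        have htail := ih (d + 1) f (by omega) hpend
        simp [pvProc, hh, hf2, hT, htail]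

-- ===== VERDICT (by name: the statement is the Claim_ definition above) =====
theorem modify_toolset_malware_spec : Claim_equal_modify_toolset_malware := by
  intro content _
  unfold Spec_modify_toolset_malware modify_toolset_malware modify_toolset_malware_alt
  set lines := (PySem.Str.split? content "\n").getD [] with hl
  congr 1
  have hA := foldlA_eq_proc lines false []
  rw [hA, List.nil_append]
  have hmain := main_lemma lines (lines.length) 0 false rfl
      (by constructor
          · intro h; exact absurd h Bool.false_ne_true
          · rintro ⟨k, hk, _⟩; omega)
  simp only [List.drop_zero] at hmain
  rw [hmain]
  apply List.map_congr_left
  intro p _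
  rw [contains_targets, wrapA_eq_wrapB]
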